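-- pv_equiv track=rewrite | github.com/adilliadil/Factify | evals/benchmark_reporting.py | within_one_level
-- ===== SOURCE A (Python) =====
-- VERDICT_ORDER = ["false", "mostly_false", "mixed", "mostly_true", "true", "unverifiable"]
--
-- def verdict_index(v: str) -> int:
--     try:
--         return VERDICT_ORDER.index(v)
--     except ValueError:
--         return -1
--
-- def within_one_level(actual: str, expected_verdicts: list[str]) -> bool:
--     actual_idx = verdict_index(actual)
--     if actual_idx == -1:
--         return False
--     return any(
--         verdict_index(ev) != -1 and abs(actual_idx - verdict_index(ev)) <= 1
--         for ev in expected_verdicts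
--     )
-- ===== SOURCE B (Python) =====
-- VERDICT_ORDER = ["false", "mostly_false", "mixed", "mostly_true", "true", "unverifiable"]
--
--
-- def within_one_level(actual, expected_verdicts):
--     try:
--         i = VERDICT_ORDER.index(actual)
--     except ValueError:
--         return False
--     expected = set(expected_verdicts)
--     return any(v in expected for v in VERDICT_ORDER[max(0, i - 1):i + 2])
-- ===== Notes on version B (the rewrite author's own statement) =====
-- stated objective: alternative
-- what changed: B inverts the iteration: instead of scanning expected_verdicts and recomputing verdict_index and a numeric distance per element, it builds a set from expected_verdicts once and probes only the <=3 verdicts of the neighbour window sliced from VERDICT_ORDER for membership in that set.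
import Mathlib
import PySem

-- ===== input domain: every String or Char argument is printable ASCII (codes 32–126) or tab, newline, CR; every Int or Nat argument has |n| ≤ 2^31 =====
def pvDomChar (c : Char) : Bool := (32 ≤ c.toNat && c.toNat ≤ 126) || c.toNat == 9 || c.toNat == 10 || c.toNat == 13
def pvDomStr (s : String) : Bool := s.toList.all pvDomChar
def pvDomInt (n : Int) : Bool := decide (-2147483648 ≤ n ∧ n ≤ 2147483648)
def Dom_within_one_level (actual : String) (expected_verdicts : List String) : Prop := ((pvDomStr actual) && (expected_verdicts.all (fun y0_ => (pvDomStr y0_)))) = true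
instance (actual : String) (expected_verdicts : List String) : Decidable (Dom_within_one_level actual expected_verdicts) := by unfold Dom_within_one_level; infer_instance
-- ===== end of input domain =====

-- B inverts the iteration: it builds a set from expected_verdicts once and probes the
-- ≤3-verdict neighbour window sliced from VERDICT_ORDER for membership in that set,
-- instead of scanning expected_verdicts computing an index and a distance per element
-- (objective: alternative decomposition, same cost).

-- ===== PORT A =====
def VERDICT_ORDER : List String :=
  ["false", "mostly_false", "mixed", "mostly_true", "true", "unverifiable"]

def verdict_index (v : String) : Int :=
  match PySem.List.index? VERDICT_ORDER v with
  | some i => (i : Int)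
  | none => -1

def within_one_level (actual : String) (expected_verdicts : List String) : Bool :=
  let actual_idx := verdict_index actual
  if actual_idx = -1 then false
  else expected_verdicts.any (fun ev =>
    (verdict_index ev != -1) && decide (|actual_idx - verdict_index ev| ≤ 1))

-- ===== PORT B =====
def within_one_level_alt (actual : String) (expected_verdicts : List String) : Bool :=
  match PySem.List.index? VERDICT_ORDER actual with
  | none => false
  | some i =>
    let expected : PySem.Set String := PySem.Set.ofList expected_verdicts
    (PySem.List.slice VERDICT_ORDER (some (max 0 ((i : Int) - 1))) (some ((i : Int) + 2))).any
      (fun v => PySem.Set.contains expected v)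

-- ===== PRECONDITION & SPEC =====
def Spec_within_one_level (actual : String) (expected_verdicts : List String) (out : Bool) : Prop := out = within_one_level_alt actual expected_verdicts
instance (actual : String) (expected_verdicts : List String) (out : Bool) : Decidable (Spec_within_one_level actual expected_verdicts out) := by unfold Spec_within_one_level; infer_instance

-- ===== CLAIM =====
def Claim_equal_within_one_level : Prop := ∀ (actual : String) (expected_verdicts : List String), Dom_within_one_level actual expected_verdicts → Spec_within_one_level actual expected_verdicts (within_one_level actual expected_verdicts)

-- ===== LEMMAS AND PROOFS =====

-- per-element agreement: for actual index i < 6, A's per-ev test equals membership of ev in B's window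
theorem body_eq (i : Nat) (hi : i < 6) (ev : String) :
    ((verdict_index ev != -1) && decide (|(i : Int) - verdict_index ev| ≤ 1))
    = decide (ev ∈ PySem.List.slice VERDICT_ORDER
        (some (max 0 ((i : Int) - 1))) (some ((i : Int) + 2))) := by
  by_cases h0 : ev = "false"
  · subst h0; interval_cases i <;> decide
  by_cases h1 : ev = "mostly_false"
  · subst h1; interval_cases i <;> decide
  by_cases h2 : ev = "mixed"
  · subst h2; interval_cases i <;> decide
  by_cases h3 : ev = "mostly_true"
  · subst h3; interval_cases i <;> decide
  by_cases h4 : ev = "true"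
  · subst h4; interval_cases i <;> decide
  by_cases h5 : ev = "unverifiable"
  · subst h5; interval_cases i <;> decide
  have hnm : ev ∉ VERDICT_ORDER := by
    simp [VERDICT_ORDER, h0, h1, h2, h3, h4, h5]
  have hidx : verdict_index ev = -1 := by
    unfold verdict_index
    rw [(PySem.List.index?_eq_none_iff _ _).mpr hnm]
  have hns : ev ∉ PySem.List.slice VERDICT_ORDER
      (some (max 0 ((i : Int) - 1))) (some ((i : Int) + 2)) := by
    intro hmem
    unfold PySem.List.slice at hmem
    exact hnm (List.mem_of_mem_drop (List.mem_of_mem_take hmem))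
  rw [hidx]
  simp [hns]

-- ===== VERDICT =====
theorem within_one_level_spec : Claim_equal_within_one_level := by
  intro actual expected_verdicts _
  unfold Spec_within_one_level within_one_level within_one_level_alt
  rcases hix : PySem.List.index? VERDICT_ORDER actual with _ | i
  · have hvi : verdict_index actual = -1 := by
      unfold verdict_index; rw [hix]
    rw [hvi]
    simp
  · have hlt : i < 6 := by
      have := PySem.List.getElem_of_index?_eq_some hix
      rcases this with ⟨hk, _⟩
      simpa [VERDICT_ORDER] using hk
    have hvi : verdict_index actual = (i : Int) := by
      unfold verdict_index; rw [hix]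
    rw [hvi, if_neg (by omega)]
    rw [List.any_congr rfl (fun ev => body_eq i hlt ev)]
    set w := PySem.List.slice VERDICT_ORDER (some (max 0 ((i : Int) - 1))) (some ((i : Int) + 2))
    have hswap : (∃ ev ∈ expected_verdicts, ev ∈ w) ↔ (∃ v ∈ w, v ∈ expected_verdicts) :=
      ⟨fun ⟨a, h1, h2⟩ => ⟨a, h2, h1⟩, fun ⟨a, h1, h2⟩ => ⟨a, h2, h1⟩⟩
    simp only [List.any_eq, PySem.Set.contains_eq_listContains, decide_eq_true_eq,
      List.contains_iff_mem, PySem.Set.mem_ofList]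
    rw [decide_eq_decide]
    exact hswap
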